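-- pv_equiv track=rewrite | github.com/wooziemcic/cutler-web | make_pdf.py | _normalize_pages
-- ===== SOURCE A (Python) =====
-- from typing import Any, Dict, List, Optional, Tuple, Set
--
-- def _normalize_pages(raw) -> List[int]:
--     pages = raw or []
--     out: Set[int] = set()
--     for p in pages:
--         try:
--             out.add(int(p))
--         except Exception:
--             continue
--     return sorted(out)
-- ===== SOURCE B (Python) =====
-- def _merge(a, b):
--     out = []
--     i = j = 0
--     while i < len(a) and j < len(b):
--         if a[i] < b[j]:
--             out.append(a[i]); i += 1
--         elif b[j] < a[i]:
--             out.append(b[j]); j += 1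
--         else:
--             out.append(a[i]); i += 1; j += 1
--     out.extend(a[i:])
--     out.extend(b[j:])
--     return out
--
-- def _msort(xs):
--     if len(xs) <= 1:
--         return xs
--     mid = len(xs) // 2
--     return _merge(_msort(xs[:mid]), _msort(xs[mid:]))
--
-- def _normalize_pages(raw):
--     vals = []
--     for p in (raw or []):
--         try:
--             vals.append(int(p))
--         except Exception:
--             continue
--     return _msort(vals)
-- ===== Notes on version B (the rewrite author's own statement) =====
-- stated objective: alternative
-- what changed: B uses no set and no builtin sort: it collects the converted ints into a list and runs a hand-written merge sort whose merge step emits an element once when both sides are equal, so deduplication happens inside the merge.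
import Mathlib
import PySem

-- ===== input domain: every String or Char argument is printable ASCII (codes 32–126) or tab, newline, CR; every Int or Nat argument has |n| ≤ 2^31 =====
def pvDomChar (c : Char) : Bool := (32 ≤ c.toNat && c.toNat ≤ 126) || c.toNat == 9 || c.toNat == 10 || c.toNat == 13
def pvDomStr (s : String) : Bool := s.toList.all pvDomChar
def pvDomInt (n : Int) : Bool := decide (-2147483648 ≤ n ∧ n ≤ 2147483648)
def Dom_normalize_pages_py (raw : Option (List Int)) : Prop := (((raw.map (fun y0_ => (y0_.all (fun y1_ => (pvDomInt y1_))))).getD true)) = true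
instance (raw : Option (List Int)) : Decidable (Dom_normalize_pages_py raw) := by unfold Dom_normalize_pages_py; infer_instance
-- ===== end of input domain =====

-- B replaces A's hash set + builtin sort by a hand-written merge sort that deduplicates inside the merge step (alternative algorithm, comparable cost).

-- ===== PORT A =====
-- 'raw or []' on Option (List Int): none → []; 'some [] or []' is [] either way.
-- int(p) on an int is the identity and never raises, so the try/except adds p unconditionally.
def normalize_pages_py (raw : Option (List Int)) : List Int :=
  let pages := raw.getD []
  let out : PySem.Set Int := pages.foldl (fun s p => PySem.Set.add s p) PySem.Set.empty
  PySem.List.sorted out (fun x => x) false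

-- ===== PORT B =====
-- B's two-index merge loop, as the obvious structural recursion on the two lists
-- (the trailing out.extend(a[i:]); out.extend(b[j:]) are the [],b / a,[] base cases).
def pvMerge : List Int → List Int → List Int
  | [], b => b
  | a, [] => a
  | x :: xs, y :: ys =>
    if x < y then x :: pvMerge xs (y :: ys)
    else if y < x then y :: pvMerge (x :: xs) ys
    else x :: pvMerge xs ys
termination_by a b => a.length + b.length

-- xs[:mid] / xs[mid:] with 0 ≤ mid ≤ len(xs) are exactly take/drop.
def pvMsort (xs : List Int) : List Int :=
  if _h : xs.length ≤ 1 then xs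
  else
    let mid := xs.length / 2
    pvMerge (pvMsort (xs.take mid)) (pvMsort (xs.drop mid))
termination_by xs.length
decreasing_by
  · simpa using by omega
  · simpa using by omega

-- int(p) on an int is the identity and never raises, so the try/except appends p unconditionally.
def normalize_pages_py_alt (raw : Option (List Int)) : List Int :=
  let vals := (raw.getD []).foldl (fun acc p => acc ++ [p]) []
  pvMsort vals

-- ===== PRECONDITION & SPEC =====
def Spec_normalize_pages_py (raw : Option (List Int)) (out : List Int) : Prop := out = normalize_pages_py_alt raw
instance (raw : Option (List Int)) (out : List Int) : Decidable (Spec_normalize_pages_py raw out) := by unfold Spec_normalize_pages_py; infer_instance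

-- ===== CLAIM (what is proved, stated in full; the proofs are below) =====
def Claim_equal_normalize_pages_py : Prop := ∀ (raw : Option (List Int)), Dom_normalize_pages_py raw → Spec_normalize_pages_py raw (normalize_pages_py raw)

-- ===== LEMMAS AND PROOFS =====

theorem pv_foldl_append (l : List Int) : ∀ init : List Int,
    l.foldl (fun acc p => acc ++ [p]) init = init ++ l := by
  induction l with
  | nil => simp
  | cons v r ih => intro init; simp [List.foldl, ih]

theorem pvMerge_spec (a b : List Int)
    (ha : a.Pairwise (· < ·)) (hb : b.Pairwise (· < ·)) :
    (pvMerge a b).Pairwise (· < ·) ∧ (∀ z, z ∈ pvMerge a b ↔ z ∈ a ∨ z ∈ b) := by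
  fun_induction pvMerge a b with
  | case1 b => simpa using hb
  | case2 a _ => simpa using ha
  | case3 x xs y ys hxy ih =>
    have hx : ∀ t ∈ xs, x < t := (List.pairwise_cons.mp ha).1
    have h := ih (List.pairwise_cons.mp ha).2 hb
    constructor
    · refine List.pairwise_cons.mpr ⟨?_, h.1⟩
      intro t ht
      rcases (h.2 t).mp ht with ht' | ht'
      · exact hx t ht'
      · rcases List.mem_cons.mp ht' with rfl | ht''
        · exact hxy
        · exact hxy.trans ((List.pairwise_cons.mp hb).1 t ht'')
    · intro z; simp only [List.mem_cons, h.2 z]; tauto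
  | case4 x xs y ys hxy hyx ih =>
    have hy : ∀ t ∈ ys, y < t := (List.pairwise_cons.mp hb).1
    have h := ih ha (List.pairwise_cons.mp hb).2
    constructor
    · refine List.pairwise_cons.mpr ⟨?_, h.1⟩
      intro t ht
      rcases (h.2 t).mp ht with ht' | ht'
      · rcases List.mem_cons.mp ht' with rfl | ht''
        · exact hyx
        · exact hyx.trans ((List.pairwise_cons.mp ha).1 t ht'')
      · exact hy t ht'
    · intro z; simp only [List.mem_cons, h.2 z]; tauto
  | case5 x xs y ys hxy hyx ih =>
    have hxy' : x = y := by omega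
    have hx : ∀ t ∈ xs, x < t := (List.pairwise_cons.mp ha).1
    have hy : ∀ t ∈ ys, y < t := (List.pairwise_cons.mp hb).1
    have h := ih (List.pairwise_cons.mp ha).2 (List.pairwise_cons.mp hb).2
    constructor
    · refine List.pairwise_cons.mpr ⟨?_, h.1⟩
      intro t ht
      rcases (h.2 t).mp ht with ht' | ht'
      · exact hx t ht'
      · exact hxy' ▸ hy t ht'
    · intro z
      simp only [List.mem_cons, h.2 z]
      subst hxy'; tauto

theorem pvMsort_spec (xs : List Int) :
    (pvMsort xs).Pairwise (· < ·) ∧ (∀ z, z ∈ pvMsort xs ↔ z ∈ xs) := by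
  fun_induction pvMsort xs with
  | case1 xs h =>
    match xs, h with
    | [], _ => simp
    | [x], _ => simp
  | case2 xs h mid ih1 ih2 =>
    have hm := pvMerge_spec _ _ ih1.1 ih2.1
    refine ⟨hm.1, fun z => ?_⟩
    rw [hm.2 z, ih1.2 z, ih2.2 z, ← List.mem_append, List.take_append_drop]

-- ===== VERDICT (by name: the statement is the Claim_ definition above) =====
theorem normalize_pages_py_spec : Claim_equal_normalize_pages_py := by
  intro raw _
  unfold Spec_normalize_pages_py normalize_pages_py normalize_pages_py_alt
  show PySem.List.sorted ((raw.getD []).foldl (fun s p => PySem.Set.add s p) PySem.Set.empty) (fun x => x) false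
      = pvMsort ((raw.getD []).foldl (fun acc p => acc ++ [p]) [])
  set pages := raw.getD [] with hpages
  rw [pv_foldl_append, List.nil_append]
  have hA : pages.foldl (fun s p => PySem.Set.add s p) PySem.Set.empty = PySem.Set.ofList pages := by
    rw [PySem.Set.ofList_eq_foldl]; rfl
  rw [hA]
  have hB := pvMsort_spec pages
  refine PySem.List.sorted_eq_of_perm_of_pairwise_lt _ _ _ ?_ ?_
  · refine (List.perm_ext_iff_of_nodup ?_ ?_).mpr ?_
    · exact hB.1.imp (fun h => ne_of_lt h)
    · exact PySem.Set.nodup_ofList (xs := pages)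
    · intro a
      rw [hB.2 a, PySem.Set.mem_ofList]
  · exact hB.1.imp (fun h => by simpa using h)
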